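-- pv_equiv track=rewrite | github.com/pabloschwarzenberg/grader | tema10_ej2/tema10_ej2_7277d66b1605dcae0960499472b22270.py | levenshtein
-- ===== SOURCE A (Python) =====
-- def levenshtein(palabra1, palabra2):
--     m = len(palabra1)
--     n = len(palabra2)
--
--     if abs(m - n) > 1:
--         return "+1"
--
--     if m == n:
--         distancia = sum(palabra1[i] != palabra2[i] for i in range(m))
--         if distancia == 0:
--             return "0D"
--         elif distancia == 1:
--             return "1S"
--         else:
--             return "+1"
--
--     if m > n:
--         palabra1, palabra2 = palabra2, palabra1
--         m, n = n, m
--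
--     dp = [i for i in range(m + 1)]
--     for j in range(1, n + 1):
--         prev = dp[0]
--         dp[0] = j
--         for i in range(1, m + 1):
--             temp = dp[i]
--             if palabra1[i - 1] == palabra2[j - 1]:
--                 dp[i] = prev
--             else:
--                 dp[i] = min(prev + 1, dp[i] + 1, dp[i - 1] + 1)
--             prev = temp
--
--     distancia = dp[m]
--     if distancia == 0:
--         return "0D"
--     elif distancia == 1:
--         return "IB"
--     else:
--         return "+1"
-- ===== SOURCE B (Python) =====
-- def levenshtein(palabra1, palabra2):
--     m = len(palabra1)
--     n = len(palabra2)
--     if m == n: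
--         d = sum(a != b for a, b in zip(palabra1, palabra2))
--         return "0D" if d == 0 else ("1S" if d == 1 else "+1")
--     if abs(m - n) != 1:
--         return "+1"
--     s, t = (palabra1, palabra2) if m < n else (palabra2, palabra1)
--     i = 0
--     while i < len(s) and s[i] == t[i]:
--         i += 1
--     return "IB" if s[i:] == t[i + 1:] else "+1"
-- ===== Notes on version B (the rewrite author's own statement) =====
-- stated objective: alternative
-- what changed: Replaces the O(m*n) dynamic-programming edit-distance row for the length-difference-1 case by a linear two-pointer single-deletion check (skip the common prefix, then compare the remaining suffixes), and replaces the index-based mismatch sum for equal lengths by a zip-based count.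
import Mathlib
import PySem

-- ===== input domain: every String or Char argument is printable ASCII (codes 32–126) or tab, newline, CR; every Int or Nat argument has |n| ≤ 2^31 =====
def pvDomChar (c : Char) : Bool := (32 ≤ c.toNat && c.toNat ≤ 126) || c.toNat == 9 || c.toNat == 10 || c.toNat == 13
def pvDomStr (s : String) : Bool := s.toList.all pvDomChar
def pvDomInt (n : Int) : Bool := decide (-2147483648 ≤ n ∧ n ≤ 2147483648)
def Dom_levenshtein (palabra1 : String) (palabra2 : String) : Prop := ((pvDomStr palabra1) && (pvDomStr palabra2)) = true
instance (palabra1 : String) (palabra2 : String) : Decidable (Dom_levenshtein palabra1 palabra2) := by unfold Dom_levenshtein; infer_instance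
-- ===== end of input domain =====

-- B replaces A's dynamic-programming edit-distance row by a two-pointer single-deletion
-- check (objective: alternative algorithm); both compute the same classification string.

-- ===== PORT A =====
-- sum(palabra1[i] != palabra2[i] for i in range(m)); both lists have length m, so getD is exact
def levMismatchSum (s t : List Char) (m : Nat) : Nat :=
  ((List.range m).map (fun i => if s.getD i ' ' ≠ t.getD i ' ' then 1 else 0)).sum

-- body of the inner 'for i in range(1, m+1)' loop; state = (dp, prev); 1 ≤ i ≤ m < dp.length,
-- so getD/set are exact for Python's dp[i] indexing
def levStep (s t : List Char) (j : Nat) (st : List Nat × Nat) (i : Nat) : List Nat × Nat :=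
  let temp := st.1.getD i 0
  let newv := if s.getD (i-1) ' ' = t.getD (j-1) ' ' then st.2
              else min (st.2 + 1) (min (temp + 1) (st.1.getD (i-1) 0 + 1))
  (st.1.set i newv, temp)

-- the inner loop itself, entered with dp[0] already set to j and prev = old dp[0]
def levInner (s t : List Char) (j m : Nat) (dp : List Nat) (prev : Nat) : List Nat × Nat :=
  (List.range' 1 m).foldl (levStep s t j) (dp, prev)

def levenshtein (palabra1 : String) (palabra2 : String) : String :=
  let m0 := palabra1.toList.length
  let n0 := palabra2.toList.length
  if ((m0 : Int) - (n0 : Int)).natAbs > 1 then "+1"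
  else if m0 = n0 then
    let distancia := levMismatchSum palabra1.toList palabra2.toList m0
    if distancia = 0 then "0D" else if distancia = 1 then "1S" else "+1"
  else
    -- if m > n: swap
    let s := if m0 > n0 then palabra2.toList else palabra1.toList
    let t := if m0 > n0 then palabra1.toList else palabra2.toList
    let m := if m0 > n0 then n0 else m0
    let n := if m0 > n0 then m0 else n0
    -- dp = [i for i in range(m+1)]; for j in range(1, n+1): prev=dp[0]; dp[0]=j; <inner loop>
    let dp := (List.range' 1 n).foldl
        (fun dp j => (levInner s t j m (dp.set 0 j) (dp.getD 0 0)).1) (List.range (m+1))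
    let distancia := dp.getD m 0
    if distancia = 0 then "0D" else if distancia = 1 then "IB" else "+1"

-- ===== PORT B =====
-- the while loop 'advance i past the common prefix' then 's[i:] == t[i+1:]';
-- the (_ :: _, []) case is unreachable when t is one longer than s
def oneDelB : List Char → List Char → Bool
  | [], t => decide (t.drop 1 = [])
  | _ :: _, [] => false
  | x :: s, y :: t => if x = y then oneDelB s t else decide (x :: s = t)

def levenshtein_alt (palabra1 : String) (palabra2 : String) : String :=
  let m := palabra1.toList.length
  let n := palabra2.toList.length
  if m = n then
    let d := (palabra1.toList.zip palabra2.toList).countP (fun p => decide (p.1 ≠ p.2))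
    if d = 0 then "0D" else if d = 1 then "1S" else "+1"
  else if ((m : Int) - (n : Int)).natAbs ≠ 1 then "+1"
  else
    let s := if m < n then palabra1.toList else palabra2.toList
    let t := if m < n then palabra2.toList else palabra1.toList
    if oneDelB s t then "IB" else "+1"

-- ===== PRECONDITION & SPEC =====
def Spec_levenshtein (palabra1 : String) (palabra2 : String) (out : String) : Prop := out = levenshtein_alt palabra1 palabra2
instance (palabra1 : String) (palabra2 : String) (out : String) : Decidable (Spec_levenshtein palabra1 palabra2 out) := by unfold Spec_levenshtein; infer_instance

-- ===== CLAIM (what is proved, stated in full; the proofs are below) =====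
def Claim_equal_levenshtein : Prop := ∀ (palabra1 : String) (palabra2 : String), Dom_levenshtein palabra1 palabra2 → Spec_levenshtein palabra1 palabra2 (levenshtein palabra1 palabra2)

-- ===== LEMMAS AND PROOFS =====

-- reference Levenshtein distance on lists (consuming heads)
def lev : List Char → List Char → Nat
  | [], ys => ys.length
  | x :: xs, [] => (x :: xs).length
  | x :: xs, y :: ys =>
      if x = y then lev xs ys
      else 1 + min (min (lev xs (y :: ys)) (lev (x :: xs) ys)) (lev xs ys)
termination_by xs ys => xs.length + ys.length
decreasing_by all_goals simp <;> omega

theorem lev_nil_right (xs : List Char) : lev xs [] = xs.length := by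
  cases xs <;> simp [lev]

theorem lev_eq_zero (a b : List Char) : lev a b = 0 ↔ a = b := by
  induction a generalizing b with
  | nil => cases b <;> simp [lev]
  | cons x xs ih =>
    cases b with
    | nil => simp [lev]
    | cons y ys =>
      by_cases h : x = y
      · simp [lev, h, ih]
      · simp [lev, h]

-- a occurs in b by deleting exactly one character of b
def oneDelP (a b : List Char) : Prop := ∃ u c v, b = u ++ c :: v ∧ a = u ++ v

theorem oneDelP_cons (x : Char) (a b : List Char) :
    oneDelP (x :: a) (x :: b) ↔ oneDelP a b := by
  constructor
  · rintro ⟨u, c, v, hb, ha⟩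
    cases u with
    | nil =>
      simp at hb ha
      exact ⟨[], x, a, by simpa [hb.2] using ha.symm, by simp⟩
    | cons d u' =>
      simp at hb ha
      exact ⟨u', c, v, hb.2, ha.2⟩
  · rintro ⟨u, c, v, hb, ha⟩
    exact ⟨x :: u, c, v, by simp [hb], by simp [ha]⟩

theorem oneDelP_cons_ne {x y : Char} (hxy : x ≠ y) (a b : List Char) :
    oneDelP (x :: a) (y :: b) ↔ x :: a = b := by
  constructor
  · rintro ⟨u, c, v, hb, ha⟩
    cases u with
    | nil =>
      simp at hb ha
      subst ha
      simp [hb.2]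
    | cons d u' =>
      simp at hb ha
      exact absurd (ha.1.trans hb.1.symm) hxy
  · intro h
    exact ⟨[], y, b, by simp, by simp [h]⟩

theorem oneDelP_rev {a b : List Char} (h : oneDelP a b) :
    oneDelP a.reverse b.reverse := by
  obtain ⟨u, c, v, hb, ha⟩ := h
  exact ⟨v.reverse, c, u.reverse, by simp [hb], by simp [ha]⟩

theorem oneDelP_rev_iff (a b : List Char) :
    oneDelP a.reverse b.reverse ↔ oneDelP a b := by
  constructor
  · intro h
    have := oneDelP_rev h
    simpa using this
  · exact oneDelP_rev

theorem lev_eq_one_iff (a : List Char) : ∀ b : List Char,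
    b.length = a.length + 1 → (lev a b = 1 ↔ oneDelP a b) := by
  induction a with
  | nil =>
    intro b hb
    match b, hb with
    | [c], _ =>
      simp [lev]
      exact ⟨[], c, [], by simp, by simp⟩
  | cons x a' ih =>
    intro b hb
    match b, hb with
    | y :: b', hb =>
      have hb' : b'.length = a'.length + 1 := by simpa using hb
      by_cases hxy : x = y
      · subst hxy
        rw [show lev (x :: a') (x :: b') = lev a' b' from by simp [lev]]
        rw [oneDelP_cons]
        exact ih b' hb'
      · rw [oneDelP_cons_ne hxy]
        have h1 : lev a' (y :: b') ≠ 0 := by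
          rw [Ne, lev_eq_zero]
          intro h
          have := congrArg List.length h
          simp at this
          omega
        have h2 : lev a' b' ≠ 0 := by
          rw [Ne, lev_eq_zero]
          intro h
          have := congrArg List.length h
          omega
        rw [show lev (x :: a') (y :: b') =
              1 + min (min (lev a' (y :: b')) (lev (x :: a') b')) (lev a' b') from by
            simp [lev, hxy]]
        rw [show (x :: a' = b') ↔ lev (x :: a') b' = 0 from (lev_eq_zero _ _).symm]
        omega

theorem oneDelB_iff (a : List Char) : ∀ b : List Char,
    b.length = a.length + 1 → (oneDelB a b = true ↔ oneDelP a b) := by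
  induction a with
  | nil =>
    intro b hb
    match b, hb with
    | [c], _ =>
      simp [oneDelB]
      exact ⟨[], c, [], by simp, by simp⟩
  | cons x a' ih =>
    intro b hb
    match b, hb with
    | y :: b', hb =>
      have hb' : b'.length = a'.length + 1 := by simpa using hb
      by_cases hxy : x = y
      · subst hxy
        simp only [oneDelB]
        rw [oneDelP_cons]
        exact ih b' hb'
      · simp only [oneDelB, if_neg hxy]
        rw [oneDelP_cons_ne hxy]
        simp

-- distance between reversed prefixes: pl i j = lev of (first i of s reversed) and (first j of t reversed)
def pl (s t : List Char) (i j : Nat) : Nat := lev ((s.take i).reverse) ((t.take j).reverse)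

theorem pl_zero_left (s t : List Char) (j : Nat) (h : j ≤ t.length) : pl s t 0 j = j := by
  simp [pl, lev]
  omega

theorem pl_zero_right (s t : List Char) (i : Nat) (h : i ≤ s.length) : pl s t i 0 = i := by
  simp [pl, lev_nil_right]
  omega

theorem take_succ_reverse (l : List Char) (i : Nat) (h : i < l.length) :
    (l.take (i+1)).reverse = l[i] :: (l.take i).reverse := by
  rw [List.take_add_one]
  simp [List.getElem?_eq_getElem h]

theorem pl_succ (s t : List Char) (i j : Nat) (hi : i < s.length) (hj : j < t.length) :
    pl s t (i+1) (j+1) =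
      if s.getD i ' ' = t.getD j ' ' then pl s t i j
      else 1 + min (min (pl s t i (j+1)) (pl s t (i+1) j)) (pl s t i j) := by
  have hs := take_succ_reverse s i hi
  have ht := take_succ_reverse t j hj
  simp only [pl, hs, ht]
  rw [show lev (s[i] :: (s.take i).reverse) (t[j] :: (t.take j).reverse) =
        if s[i] = t[j] then lev ((s.take i).reverse) ((t.take j).reverse)
        else 1 + min (min (lev ((s.take i).reverse) (t[j] :: (t.take j).reverse))
                          (lev (s[i] :: (s.take i).reverse) ((t.take j).reverse)))
                     (lev ((s.take i).reverse) ((t.take j).reverse)) from by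
        simp [lev]]
  rw [List.getD_eq_getElem s ' ' hi, List.getD_eq_getElem t ' ' hj]

-- correct row after j columns
def plRow (s t : List Char) (m j : Nat) : List Nat := (List.range (m+1)).map (fun i => pl s t i j)

-- partially updated row inside column j+1: entries ≤ k already updated
def plMix (s t : List Char) (m j k : Nat) : List Nat :=
  (List.range (m+1)).map (fun i => if i ≤ k then pl s t i (j+1) else pl s t i j)

theorem getD_map_range (f : Nat → Nat) (n i : Nat) (h : i < n) :
    ((List.range n).map f).getD i 0 = f i := by
  rw [List.getD_eq_getElem _ _ (by simpa using h)]
  simp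

theorem levStep_mix (s t : List Char) (m c k : Nat) (hm : m ≤ s.length) (hc : c < t.length)
    (hk : k < m) :
    levStep s t (c+1) (plMix s t m c k, pl s t k c) (k+1) = (plMix s t m c (k+1), pl s t (k+1) c) := by
  have hks : k < s.length := by omega
  have htemp : (plMix s t m c k).getD (k+1) 0 = pl s t (k+1) c := by
    simp only [plMix]
    rw [getD_map_range _ _ _ (by omega)]
    simp
  have hleft : (plMix s t m c k).getD k 0 = pl s t k (c+1) := by
    simp only [plMix]
    rw [getD_map_range _ _ _ (by omega)]
    simp
  have hnew : (if s.getD k ' ' = t.getD c ' ' then pl s t k c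
               else min (pl s t k c + 1) (min (pl s t (k+1) c + 1) (pl s t k (c+1) + 1)))
              = pl s t (k+1) (c+1) := by
    rw [pl_succ s t k c hks hc]
    split_ifs with h
    · rfl
    · omega
  have hset : (plMix s t m c k).set (k+1) (pl s t (k+1) (c+1)) = plMix s t m c (k+1) := by
    apply List.ext_getElem
    · simp [plMix]
    · intro i h1 h2
      simp only [plMix, List.getElem_set, List.getElem_map, List.getElem_range]
      by_cases e : k + 1 = i
      · subst e
        simp
      · rw [if_neg e]
        by_cases e2 : i ≤ k
        · rw [if_pos e2, if_pos (by omega)]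
        · rw [if_neg e2, if_neg (by omega)]
  simp only [levStep, htemp, Nat.add_sub_cancel, hleft]
  rw [hnew, hset]

theorem inner_loop (s t : List Char) (m c : Nat) (hm : m ≤ s.length) (hc : c < t.length) :
    ∀ k, k ≤ m →
      (List.range' 1 k).foldl (levStep s t (c+1)) (plMix s t m c 0, pl s t 0 c)
        = (plMix s t m c k, pl s t k c) := by
  intro k
  induction k with
  | zero => intro _; simp
  | succ k ih =>
    intro hk
    rw [List.range'_1_concat, show 1 + k = k + 1 from by omega, List.foldl_append, ih (by omega)]
    simpa using levStep_mix s t m c k hm hc (by omega)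

theorem outer_loop (s t : List Char) (m : Nat) (hm : m ≤ s.length) :
    ∀ c, c ≤ t.length →
      (List.range' 1 c).foldl
        (fun dp j => (levInner s t j m (dp.set 0 j) (dp.getD 0 0)).1) (List.range (m+1))
        = plRow s t m c := by
  intro c
  induction c with
  | zero =>
    intro _
    apply List.ext_getElem
    · simp [plRow]
    · intro i h1 h2
      simp only [plRow, List.getElem_map, List.getElem_range]
      rw [pl_zero_right s t i (by simp at h1; omega)]
      simp
  | succ c ih =>
    intro hc
    rw [List.range'_1_concat, show 1 + c = c + 1 from by omega, List.foldl_append, ih (by omega)]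
    have hprev : (plRow s t m c).getD 0 0 = pl s t 0 c := by
      simp only [plRow]
      rw [getD_map_range _ _ _ (by omega)]
    have hset : (plRow s t m c).set 0 (c + 1) = plMix s t m c 0 := by
      apply List.ext_getElem
      · simp [plRow, plMix]
      · intro i h1 h2
        simp only [plRow, plMix, List.getElem_set, List.getElem_map, List.getElem_range]
        by_cases h0 : 0 = i
        · subst h0
          rw [if_pos rfl, if_pos (Nat.le_refl 0), pl_zero_left s t (c+1) (by omega)]
        · rw [if_neg h0, if_neg (by omega)]
    simp only [List.foldl_cons, List.foldl_nil, levInner]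
    rw [hprev, hset, inner_loop s t m c hm (by omega) m (Nat.le_refl m)]
    apply List.ext_getElem
    · simp [plMix, plRow]
    · intro i h1 h2
      simp only [plMix, plRow, List.getElem_map, List.getElem_range]
      rw [if_pos (show i ≤ m by simp [plMix] at h1; omega)]

theorem mismatch_sum (s : List Char) : ∀ t : List Char, s.length = t.length →
    levMismatchSum s t s.length = (s.zip t).countP (fun p => decide (p.1 ≠ p.2)) := by
  induction s with
  | nil => intro t h; simp [levMismatchSum]
  | cons x s' ih =>
    intro t h
    match t, h with
    | y :: t', h =>
      have h' : s'.length = t'.length := by simpa using h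
      rw [levMismatchSum, show (x :: s').length = s'.length + 1 from rfl,
          List.range_succ_eq_map]
      simp only [List.map_cons, List.map_map, List.sum_cons]
      rw [show ((List.range s'.length).map
            ((fun i => if (x :: s').getD i ' ' ≠ (y :: t').getD i ' ' then 1 else 0) ∘ Nat.succ))
          = (List.range s'.length).map (fun i => if s'.getD i ' ' ≠ t'.getD i ' ' then 1 else 0) from by
        apply List.map_congr_left
        intro i _
        simp [Function.comp]]
      rw [show ((List.range s'.length).map
            (fun i => if s'.getD i ' ' ≠ t'.getD i ' ' then 1 else 0)).sum
          = levMismatchSum s' t' s'.length from rfl]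
      rw [ih t' h']
      simp only [List.zip_cons_cons, List.countP_cons]
      by_cases hxy : x = y
      · simp [hxy]
      · simp [hxy]
        omega

theorem levA_dp (s t : List Char) :
    ((List.range' 1 t.length).foldl
       (fun dp j => (levInner s t j s.length (dp.set 0 j) (dp.getD 0 0)).1)
       (List.range (s.length+1))).getD s.length 0 = lev s.reverse t.reverse := by
  rw [outer_loop s t s.length (Nat.le_refl _) t.length (Nat.le_refl _)]
  simp only [plRow]
  rw [getD_map_range _ _ _ (by omega)]
  simp [pl]

theorem lev_rev_ne_zero (s t : List Char) (h : t.length = s.length + 1) :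
    lev s.reverse t.reverse ≠ 0 := by
  rw [Ne, lev_eq_zero]
  intro he
  have := congrArg List.length he
  simp at this
  omega

theorem lev_rev_eq_one (s t : List Char) (h : t.length = s.length + 1) :
    lev s.reverse t.reverse = 1 ↔ oneDelB s t = true := by
  rw [lev_eq_one_iff s.reverse t.reverse (by simp [h]), oneDelP_rev_iff,
      ← oneDelB_iff s t h]

theorem dp_branch (s t : List Char) (h : t.length = s.length + 1) :
    (if ((List.range' 1 t.length).foldl
           (fun dp j => (levInner s t j s.length (dp.set 0 j) (dp.getD 0 0)).1)
           (List.range (s.length+1))).getD s.length 0 = 0 then "0D"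
     else if ((List.range' 1 t.length).foldl
           (fun dp j => (levInner s t j s.length (dp.set 0 j) (dp.getD 0 0)).1)
           (List.range (s.length+1))).getD s.length 0 = 1 then "IB" else "+1")
    = (if oneDelB s t then "IB" else "+1") := by
  rw [levA_dp s t]
  have hz := lev_rev_ne_zero s t h
  have ho := lev_rev_eq_one s t h
  by_cases hb : oneDelB s t
  · rw [if_pos hb, if_neg hz, if_pos (ho.mpr hb)]
  · rw [if_neg hb, if_neg hz, if_neg (fun hh => hb (ho.mp hh))]

theorem levenshtein_main (p1 p2 : String) : levenshtein p1 p2 = levenshtein_alt p1 p2 := by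
  simp only [levenshtein, levenshtein_alt]
  by_cases h1 : ((p1.toList.length : Int) - (p2.toList.length : Int)).natAbs > 1
  · rw [if_pos h1, if_neg (show ¬ p1.toList.length = p2.toList.length by omega),
        if_pos (show ((p1.toList.length : Int) - (p2.toList.length : Int)).natAbs ≠ 1 by omega)]
  · by_cases h2 : p1.toList.length = p2.toList.length
    · rw [if_neg h1, if_pos h2, if_pos h2, mismatch_sum p1.toList p2.toList h2]
    · have hd1 : ((p1.toList.length : Int) - (p2.toList.length : Int)).natAbs = 1 := by omega
      rw [if_neg h1, if_neg h2, if_neg h2,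
          if_neg (show ¬ ((p1.toList.length : Int) - (p2.toList.length : Int)).natAbs ≠ 1 by omega)]
      by_cases hlt : p1.toList.length < p2.toList.length
      · have hlen : p2.toList.length = p1.toList.length + 1 := by omega
        simp only [if_pos hlt, if_neg (show ¬ p1.toList.length > p2.toList.length by omega)]
        exact dp_branch p1.toList p2.toList hlen
      · have hgt : p1.toList.length > p2.toList.length := by omega
        have hlen : p1.toList.length = p2.toList.length + 1 := by omega
        simp only [if_neg hlt, if_pos hgt]
        exact dp_branch p2.toList p1.toList hlen

-- ===== VERDICT (by name: the statement is the Claim_ definition above) =====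
theorem levenshtein_spec : Claim_equal_levenshtein := by
  intro p1 p2 _
  unfold Spec_levenshtein
  exact levenshtein_main p1 p2
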